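-- pv_equiv track=rewrite | github.com/mikegirenko/python-learning | edabit/maximum_and_minimum_product_triplets.py | min_product
-- ===== SOURCE A (Python) =====
-- import math
--
-- def min_product(input_list) -> int:
--     # Find triplets
--     list_of_triplets = []
--     n = len(input_list)
--     # Fix the first element as arr[i]
--     for i in range(n - 2):
--         # Fix the second element as arr[j]
--         for j in range(i + 1, n - 1):
--             # Now look for the third number
--             for k in range(j + 1, n):
--                 list_of_triplets.append([input_list[i], input_list[j], input_list[k]])
--
--     # Find max from list of triplets:
--     triplet_sum = 0
--     temp_triplet_sum = 0
--     for triplet in list_of_triplets: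
--         triplet_sum = math.prod(triplet)
--         if temp_triplet_sum > triplet_sum:
--             temp_triplet_sum = triplet_sum
--         else:
--             triplet_sum = temp_triplet_sum
--     product = triplet_sum
--
--     return product
-- ===== SOURCE B (Python) =====
-- def min_product(input_list) -> int:
--     # One pass: track min/max element, min/max pair product, min triple product.
--     m1 = M1 = mp = Mp = mt = None
--     for z in input_list:
--         if mp is not None:
--             t = min(mp * z, Mp * z)
--             mt = t if mt is None else min(mt, t)
--         if m1 is not None:
--             p, q = m1 * z, M1 * z
--             mp = min(p, q) if mp is None else min(mp, p, q)
--             Mp = max(p, q) if Mp is None else max(Mp, p, q)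
--         m1 = z if m1 is None else min(m1, z)
--         M1 = z if M1 is None else max(M1, z)
--     return 0 if mt is None else min(0, mt)
-- ===== Notes on version B (the rewrite author's own statement) =====
-- stated objective: faster
-- what changed: Replaced the O(n^3) enumeration of all triplets with a single O(n) pass that maintains the running min/max element, min/max pair product and min triple product, clamping the final minimum at 0.
import Mathlib
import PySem

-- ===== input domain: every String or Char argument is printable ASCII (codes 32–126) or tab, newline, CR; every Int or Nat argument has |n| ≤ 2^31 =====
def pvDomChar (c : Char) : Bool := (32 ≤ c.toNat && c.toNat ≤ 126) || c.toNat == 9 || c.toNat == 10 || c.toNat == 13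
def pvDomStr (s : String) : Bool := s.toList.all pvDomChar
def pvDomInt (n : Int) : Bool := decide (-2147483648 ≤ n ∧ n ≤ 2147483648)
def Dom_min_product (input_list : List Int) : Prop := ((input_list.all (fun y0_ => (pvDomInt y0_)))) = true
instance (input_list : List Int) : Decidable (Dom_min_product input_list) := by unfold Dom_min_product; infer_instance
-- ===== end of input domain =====

-- B replaces A's O(n^3) enumeration of all triplets with a single left-to-right pass that
-- maintains the minimum/maximum element, minimum/maximum pair product and minimum triple
-- product of the prefix seen so far, then clamps the result at 0 exactly as A does.

-- ===== PORT A =====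
def min_product (input_list : List Int) : Int :=
  let n : Int := PySem.List.len input_list
  let list_of_triplets : List (List Int) :=
    (PySem.List.pyRange 0 (n - 2) 1).foldl (fun acc i =>
      (PySem.List.pyRange (i + 1) (n - 1) 1).foldl (fun acc j =>
        (PySem.List.pyRange (j + 1) n 1).foldl (fun acc k =>
          acc ++ [[PySem.List.pyGetD input_list i 0,
                   PySem.List.pyGetD input_list j 0,
                   PySem.List.pyGetD input_list k 0]]) acc) acc) []
  let st := list_of_triplets.foldl (fun (st : Int × Int) triplet =>
      let triplet_sum := triplet.prod
      if st.2 > triplet_sum then (triplet_sum, triplet_sum) else (st.2, st.2)) (0, 0)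
  st.1

-- ===== PORT B =====
def bStep (st : Option Int × Option Int × Option Int × Option Int × Option Int) (z : Int) :
    Option Int × Option Int × Option Int × Option Int × Option Int :=
  let (m1, M1, mp, Mp, mt) := st
  let mt : Option Int :=
    match mp, Mp with
    | some mpv, some Mpv =>
        let t := min (mpv * z) (Mpv * z)
        some (match mt with | none => t | some mtv => min mtv t)
    | _, _ => mt
  let mpMp : Option Int × Option Int :=
    match m1, M1 with
    | some m1v, some M1v =>
        let p := m1v * z
        let q := M1v * z
        (some (match mp with | none => min p q | some mpv => min mpv (min p q)),
         some (match Mp with | none => max p q | some Mpv => max Mpv (max p q)))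
    | _, _ => (mp, Mp)
  let m1 : Option Int := some (match m1 with | none => z | some v => min v z)
  let M1 : Option Int := some (match M1 with | none => z | some v => max v z)
  (m1, M1, mpMp.1, mpMp.2, mt)

def min_product_alt (input_list : List Int) : Int :=
  let st := input_list.foldl bStep (none, none, none, none, none)
  match st.2.2.2.2 with
  | none => 0
  | some mtv => min 0 mtv

-- ===== PRECONDITION & SPEC =====
def Spec_min_product (input_list : List Int) (out : Int) : Prop := out = min_product_alt input_list
instance (input_list : List Int) (out : Int) : Decidable (Spec_min_product input_list out) := by unfold Spec_min_product; infer_instance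

-- ===== CLAIM (what is proved, stated in full; the proofs are below) =====
def Claim_equal_min_product : Prop := ∀ (input_list : List Int), Dom_min_product input_list → Spec_min_product input_list (min_product input_list)

-- ===== LEMMAS AND PROOFS =====
def pairsP (l : List Int) : List Int :=
  match l with
  | [] => []
  | x :: xs => xs.map (fun y => x * y) ++ pairsP xs

def triplesP (l : List Int) : List Int :=
  match l with
  | [] => []
  | x :: xs => (pairsP xs).map (fun y => x * y) ++ triplesP xs

def IsMin0 (s : List Int) (v : Int) : Prop :=
  (v = 0 ∨ v ∈ s) ∧ v ≤ 0 ∧ ∀ p ∈ s, v ≤ p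

theorem isMin0_unique {s : List Int} {v w : Int} (hv : IsMin0 s v) (hw : IsMin0 s w) : v = w := by
  obtain ⟨hv1, hv2, hv3⟩ := hv
  obtain ⟨hw1, hw2, hw3⟩ := hw
  apply le_antisymm
  · rcases hw1 with h | h
    · omega
    · exact hv3 _ h
  · rcases hv1 with h | h
    · omega
    · exact hw3 _ h

theorem isMin0_congr {s t : List Int} {v : Int} (h : ∀ p, p ∈ s ↔ p ∈ t) (hv : IsMin0 s v) : IsMin0 t v := by
  obtain ⟨h1, h2, h3⟩ := hv
  refine ⟨?_, h2, fun p hp => h3 p ((h p).mpr hp)⟩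
  rcases h1 with h1 | h1
  · exact Or.inl h1
  · exact Or.inr ((h v).mp h1)

theorem foldl_min_spec (f : List Int → Int) (ts : List (List Int)) :
    ∀ c : Int, (ts.foldl (fun a t => min a (f t)) c = c ∨ ts.foldl (fun a t => min a (f t)) c ∈ ts.map f)
      ∧ ts.foldl (fun a t => min a (f t)) c ≤ c
      ∧ ∀ p ∈ ts.map f, ts.foldl (fun a t => min a (f t)) c ≤ p := by
  induction ts with
  | nil => intro c; simp
  | cons t ts ih =>
    intro c
    obtain ⟨h1, h2, h3⟩ := ih (min c (f t))
    refine ⟨?_, ?_, ?_⟩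
    · rcases h1 with h | h
      · rw [List.foldl_cons]
        rcases min_choice c (f t) with hm | hm
        · left; rw [h, hm]
        · right; rw [h, hm]; simp
      · right; rw [List.foldl_cons]; simp only [List.map_cons, List.mem_cons]; right; exact h
    · calc ts.foldl (fun a t => min a (f t)) (min c (f t)) ≤ min c (f t) := h2
        _ ≤ c := min_le_left _ _
    · intro p hp
      simp only [List.map_cons, List.mem_cons] at hp
      rcases hp with rfl | hp
      · calc ts.foldl (fun a t => min a (f t)) (min c (f t)) ≤ min c (f t) := h2
          _ ≤ f t := min_le_right _ _
      · exact h3 p hp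

theorem getD_mem_of_lt (l : List Int) (i : Nat) (h : i < l.length) : l.getD i 0 ∈ l := by
  rw [List.getD_eq_getElem l 0 h]
  exact List.getElem_mem h

theorem mem_pairsP (l : List Int) (p : Int) :
    p ∈ pairsP l ↔ ∃ i j : Nat, i < j ∧ j < l.length ∧ p = l.getD i 0 * l.getD j 0 := by
  induction l with
  | nil => simp [pairsP]
  | cons x xs ih =>
    simp only [pairsP, List.mem_append, List.mem_map, ih]
    constructor
    · rintro (⟨y, hy, rfl⟩ | ⟨i, j, hij, hj, rfl⟩)
      · obtain ⟨j, hj, rfl⟩ := List.mem_iff_getElem.mp hy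
        refine ⟨0, j + 1, by omega, by simp; omega, ?_⟩
        simp only [List.getD_cons_zero, List.getD_cons_succ]
        rw [List.getD_eq_getElem xs 0 hj]
      · exact ⟨i + 1, j + 1, by omega, by simp; omega, by simp⟩
    · rintro ⟨i, j, hij, hj, rfl⟩
      match i, j with
      | 0, j + 1 =>
        left
        refine ⟨xs.getD j 0, ?_, by simp⟩
        exact getD_mem_of_lt xs j (by simp at hj; omega)
      | i + 1, j + 1 =>
        right
        exact ⟨i, j, by omega, by simp at hj; omega, by simp⟩

theorem mem_triplesP (l : List Int) (p : Int) :
    p ∈ triplesP l ↔ ∃ i j k : Nat, i < j ∧ j < k ∧ k < l.length ∧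
      p = l.getD i 0 * (l.getD j 0 * l.getD k 0) := by
  induction l with
  | nil => simp [triplesP]
  | cons x xs ih =>
    simp only [triplesP, List.mem_append, List.mem_map, ih]
    constructor
    · rintro (⟨y, hy, rfl⟩ | ⟨i, j, k, hij, hjk, hk, rfl⟩)
      · obtain ⟨i, j, hij, hj, rfl⟩ := (mem_pairsP xs y).mp hy
        exact ⟨0, i + 1, j + 1, by omega, by omega, by simp; omega, by simp⟩
      · exact ⟨i + 1, j + 1, k + 1, by omega, by omega, by simp; omega, by simp⟩
    · rintro ⟨i, j, k, hij, hjk, hk, rfl⟩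
      match i, j, k with
      | 0, j + 1, k + 1 =>
        left
        refine ⟨xs.getD j 0 * xs.getD k 0, ?_, by simp⟩
        exact (mem_pairsP xs _).mpr ⟨j, k, by omega, by simp at hk; omega, rfl⟩
      | i + 1, j + 1, k + 1 =>
        right
        exact ⟨i, j, k, by omega, by omega, by simp at hk; omega, by simp⟩

theorem min_mul_le (a b c z : Int) (h1 : a ≤ c) (h2 : c ≤ b) : min (a * z) (b * z) ≤ c * z := by
  rcases le_total 0 z with hz | hz
  · exact le_trans (min_le_left _ _) (by nlinarith)
  · exact le_trans (min_le_right _ _) (by nlinarith)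

theorem le_max_mul (a b c z : Int) (h1 : a ≤ c) (h2 : c ≤ b) : c * z ≤ max (a * z) (b * z) := by
  rcases le_total 0 z with hz | hz
  · exact le_trans (by nlinarith) (le_max_right _ _)
  · exact le_trans (by nlinarith) (le_max_left _ _)

theorem mem_pairsP_append (pre : List Int) (z p : Int) :
    p ∈ pairsP (pre ++ [z]) ↔ p ∈ pairsP pre ∨ ∃ a ∈ pre, p = a * z := by
  rw [mem_pairsP]
  constructor
  · rintro ⟨i, j, hij, hj, rfl⟩
    simp only [List.length_append, List.length_cons, List.length_nil] at hj
    by_cases hjl : j < pre.length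
    · left
      rw [mem_pairsP]
      exact ⟨i, j, hij, hjl, by rw [List.getD_append _ _ _ _ (by omega), List.getD_append _ _ _ _ hjl]⟩
    · right
      have hj' : j = pre.length := by omega
      refine ⟨pre.getD i 0, getD_mem_of_lt pre i (by omega), ?_⟩
      rw [List.getD_append _ _ _ _ (by omega), hj', List.getD_append_right _ _ _ _ (by omega)]
      simp
  · rintro (h | ⟨a, ha, rfl⟩)
    · rw [mem_pairsP] at h
      obtain ⟨i, j, hij, hj, rfl⟩ := h
      exact ⟨i, j, hij, by simp; omega,
        by rw [List.getD_append _ _ _ _ (by omega), List.getD_append _ _ _ _ hj]⟩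
    · obtain ⟨i, hi, rfl⟩ := List.mem_iff_getElem.mp ha
      refine ⟨i, pre.length, hi, by simp, ?_⟩
      rw [List.getD_append _ _ _ _ hi, List.getD_append_right _ _ _ _ (by omega),
        List.getD_eq_getElem pre 0 hi]
      simp

theorem mem_triplesP_append (pre : List Int) (z p : Int) :
    p ∈ triplesP (pre ++ [z]) ↔ p ∈ triplesP pre ∨ ∃ q ∈ pairsP pre, p = q * z := by
  rw [mem_triplesP]
  constructor
  · rintro ⟨i, j, k, hij, hjk, hk, rfl⟩
    simp only [List.length_append, List.length_cons, List.length_nil] at hk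
    by_cases hkl : k < pre.length
    · left
      rw [mem_triplesP]
      exact ⟨i, j, k, hij, hjk, hkl, by
        rw [List.getD_append _ _ _ _ (by omega), List.getD_append _ _ _ _ (by omega),
          List.getD_append _ _ _ _ hkl]⟩
    · right
      have hk' : k = pre.length := by omega
      refine ⟨pre.getD i 0 * pre.getD j 0,
        (mem_pairsP pre _).mpr ⟨i, j, hij, by omega, rfl⟩, ?_⟩
      rw [List.getD_append _ _ _ _ (by omega), List.getD_append _ _ _ _ (by omega), hk',
        List.getD_append_right _ _ _ _ (by omega)]
      simp [mul_assoc]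
  · rintro (h | ⟨q, hq, rfl⟩)
    · rw [mem_triplesP] at h
      obtain ⟨i, j, k, hij, hjk, hk, rfl⟩ := h
      exact ⟨i, j, k, hij, hjk, by simp; omega, by
        rw [List.getD_append _ _ _ _ (by omega), List.getD_append _ _ _ _ (by omega),
          List.getD_append _ _ _ _ hk]⟩
    · obtain ⟨i, j, hij, hj, rfl⟩ := (mem_pairsP pre q).mp hq
      refine ⟨i, j, pre.length, hij, hj, by simp, ?_⟩
      rw [List.getD_append _ _ _ _ (by omega), List.getD_append _ _ _ _ hj,
        List.getD_append_right _ _ _ _ (by omega)]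
      simp [mul_assoc]

def OptMin (s : List Int) : Option Int → Prop
  | none => s = []
  | some v => v ∈ s ∧ ∀ p ∈ s, v ≤ p

def OptMax (s : List Int) : Option Int → Prop
  | none => s = []
  | some v => v ∈ s ∧ ∀ p ∈ s, p ≤ v

def GoodB (pre : List Int)
    (st : Option Int × Option Int × Option Int × Option Int × Option Int) : Prop :=
  OptMin pre st.1 ∧ OptMax pre st.2.1 ∧ OptMin (pairsP pre) st.2.2.1 ∧
    OptMax (pairsP pre) st.2.2.2.1 ∧ OptMin (triplesP pre) st.2.2.2.2

theorem triplesP_eq_nil_of_pairsP (pre : List Int) (h : pairsP pre = []) : triplesP pre = [] := by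
  cases pre with
  | nil => rfl
  | cons x xs =>
    simp only [pairsP, List.append_eq_nil_iff, List.map_eq_nil_iff] at h
    obtain ⟨rfl, -⟩ := h
    rfl

theorem optMin_sing_append (pre : List Int) (z a : Int) (h : OptMin pre (some a)) :
    OptMin (pre ++ [z]) (some (min a z)) := by
  obtain ⟨hmem, hle⟩ := h
  constructor
  · rcases min_choice a z with hm | hm <;> rw [hm] <;> simp [hmem]
  · intro p hp
    rcases List.mem_append.mp hp with hp | hp
    · exact le_trans (min_le_left _ _) (hle p hp)
    · simp only [List.mem_singleton] at hp
      subst hp; exact min_le_right _ _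

theorem optMax_sing_append (pre : List Int) (z a : Int) (h : OptMax pre (some a)) :
    OptMax (pre ++ [z]) (some (max a z)) := by
  obtain ⟨hmem, hle⟩ := h
  constructor
  · rcases max_choice a z with hm | hm <;> rw [hm] <;> simp [hmem]
  · intro p hp
    rcases List.mem_append.mp hp with hp | hp
    · exact le_trans (hle p hp) (le_max_left _ _)
    · simp only [List.mem_singleton] at hp
      subst hp; exact le_max_right _ _

theorem pairs_min_new (pre : List Int) (z a b : Int) (h1 : OptMin pre (some a))
    (h2 : OptMax pre (some b)) (h3 : pairsP pre = []) :
    OptMin (pairsP (pre ++ [z])) (some (min (a * z) (b * z))) := by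
  constructor
  · rcases min_choice (a * z) (b * z) with hm | hm <;> rw [hm] <;>
      exact (mem_pairsP_append pre z _).mpr (Or.inr ⟨_, by simp [h1.1, h2.1], rfl⟩)
  · intro p hp
    rcases (mem_pairsP_append pre z p).mp hp with hp | ⟨a', ha', rfl⟩
    · rw [h3] at hp; exact absurd hp (by simp)
    · exact min_mul_le a b a' z (h1.2 a' ha') (h2.2 a' ha')

theorem pairs_max_new (pre : List Int) (z a b : Int) (h1 : OptMin pre (some a))
    (h2 : OptMax pre (some b)) (h3 : pairsP pre = []) :
    OptMax (pairsP (pre ++ [z])) (some (max (a * z) (b * z))) := by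
  constructor
  · rcases max_choice (a * z) (b * z) with hm | hm <;> rw [hm] <;>
      exact (mem_pairsP_append pre z _).mpr (Or.inr ⟨_, by simp [h1.1, h2.1], rfl⟩)
  · intro p hp
    rcases (mem_pairsP_append pre z p).mp hp with hp | ⟨a', ha', rfl⟩
    · rw [h3] at hp; exact absurd hp (by simp)
    · exact le_max_mul a b a' z (h1.2 a' ha') (h2.2 a' ha')

theorem pairs_min_step (pre : List Int) (z a b mpv : Int) (h1 : OptMin pre (some a))
    (h2 : OptMax pre (some b)) (h3 : OptMin (pairsP pre) (some mpv)) :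
    OptMin (pairsP (pre ++ [z])) (some (min mpv (min (a * z) (b * z)))) := by
  constructor
  · rcases min_choice mpv (min (a * z) (b * z)) with hm | hm <;> rw [hm]
    · exact (mem_pairsP_append pre z _).mpr (Or.inl h3.1)
    · rcases min_choice (a * z) (b * z) with hm2 | hm2 <;> rw [hm2] <;>
        exact (mem_pairsP_append pre z _).mpr (Or.inr ⟨_, by simp [h1.1, h2.1], rfl⟩)
  · intro p hp
    rcases (mem_pairsP_append pre z p).mp hp with hp | ⟨a', ha', rfl⟩
    · exact le_trans (min_le_left _ _) (h3.2 p hp)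
    · exact le_trans (min_le_right _ _) (min_mul_le a b a' z (h1.2 a' ha') (h2.2 a' ha'))

theorem pairs_max_step (pre : List Int) (z a b Mpv : Int) (h1 : OptMin pre (some a))
    (h2 : OptMax pre (some b)) (h4 : OptMax (pairsP pre) (some Mpv)) :
    OptMax (pairsP (pre ++ [z])) (some (max Mpv (max (a * z) (b * z)))) := by
  constructor
  · rcases max_choice Mpv (max (a * z) (b * z)) with hm | hm <;> rw [hm]
    · exact (mem_pairsP_append pre z _).mpr (Or.inl h4.1)
    · rcases max_choice (a * z) (b * z) with hm2 | hm2 <;> rw [hm2] <;>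
        exact (mem_pairsP_append pre z _).mpr (Or.inr ⟨_, by simp [h1.1, h2.1], rfl⟩)
  · intro p hp
    rcases (mem_pairsP_append pre z p).mp hp with hp | ⟨a', ha', rfl⟩
    · exact le_trans (h4.2 p hp) (le_max_left _ _)
    · exact le_trans (le_max_mul a b a' z (h1.2 a' ha') (h2.2 a' ha')) (le_max_right _ _)

theorem triples_min_new (pre : List Int) (z mpv Mpv : Int)
    (h3 : OptMin (pairsP pre) (some mpv)) (h4 : OptMax (pairsP pre) (some Mpv))
    (h5 : triplesP pre = []) :
    OptMin (triplesP (pre ++ [z])) (some (min (mpv * z) (Mpv * z))) := by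
  constructor
  · rcases min_choice (mpv * z) (Mpv * z) with hm | hm <;> rw [hm] <;>
      exact (mem_triplesP_append pre z _).mpr (Or.inr ⟨_, by simp [h3.1, h4.1], rfl⟩)
  · intro p hp
    rcases (mem_triplesP_append pre z p).mp hp with hp | ⟨q, hq, rfl⟩
    · rw [h5] at hp; exact absurd hp (by simp)
    · exact min_mul_le mpv Mpv q z (h3.2 q hq) (h4.2 q hq)

theorem triples_min_step (pre : List Int) (z mpv Mpv mtv : Int)
    (h3 : OptMin (pairsP pre) (some mpv)) (h4 : OptMax (pairsP pre) (some Mpv))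
    (h5 : OptMin (triplesP pre) (some mtv)) :
    OptMin (triplesP (pre ++ [z])) (some (min mtv (min (mpv * z) (Mpv * z)))) := by
  constructor
  · rcases min_choice mtv (min (mpv * z) (Mpv * z)) with hm | hm <;> rw [hm]
    · exact (mem_triplesP_append pre z _).mpr (Or.inl h5.1)
    · rcases min_choice (mpv * z) (Mpv * z) with hm2 | hm2 <;> rw [hm2] <;>
        exact (mem_triplesP_append pre z _).mpr (Or.inr ⟨_, by simp [h3.1, h4.1], rfl⟩)
  · intro p hp
    rcases (mem_triplesP_append pre z p).mp hp with hp | ⟨q, hq, rfl⟩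
    · exact le_trans (min_le_left _ _) (h5.2 p hp)
    · exact le_trans (min_le_right _ _) (min_mul_le mpv Mpv q z (h3.2 q hq) (h4.2 q hq))

theorem GoodB_step (pre : List Int) (z : Int)
    (st : Option Int × Option Int × Option Int × Option Int × Option Int)
    (h : GoodB pre st) : GoodB (pre ++ [z]) (bStep st z) := by
  obtain ⟨m1, M1, mp, Mp, mt⟩ := st
  obtain ⟨h1, h2, h3, h4, h5⟩ := h
  simp only at h1 h2 h3 h4 h5
  match m1, M1 with
  | none, M1 =>
    have hpre : pre = [] := h1
    subst hpre
    match M1 with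
    | some v => exact absurd h2.1 (by simp)
    | none =>
    match mp with
    | some v => exact absurd h3.1 (by simp [pairsP])
    | none =>
    match Mp with
    | some v => exact absurd h4.1 (by simp [pairsP])
    | none =>
    match mt with
    | some v => exact absurd h5.1 (by simp [triplesP])
    | none =>
      show GoodB [z] (some z, some z, none, none, none)
      exact ⟨⟨by simp, by simp⟩, ⟨by simp, by simp⟩, by rfl, by rfl, by rfl⟩
  | some a, M1 =>
    match M1 with
    | none => exact absurd (h2 ▸ h1.1) (by simp)
    | some b =>
    match mp, Mp with
    | none, some v => exact absurd (h3 ▸ h4.1) (by simp)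
    | some v, none => exact absurd (h4 ▸ h3.1) (by simp)
    | none, none =>
      have htr : triplesP pre = [] := triplesP_eq_nil_of_pairsP pre h3
      match mt with
      | some v => exact absurd (htr ▸ h5.1) (by simp)
      | none =>
        show GoodB (pre ++ [z]) (some (min a z), some (max b z),
          some (min (a * z) (b * z)), some (max (a * z) (b * z)), none)
        refine ⟨optMin_sing_append pre z a h1, optMax_sing_append pre z b h2,
          pairs_min_new pre z a b h1 h2 h3, pairs_max_new pre z a b h1 h2 h3, ?_⟩
        show triplesP (pre ++ [z]) = []
        rw [List.eq_nil_iff_forall_not_mem]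
        intro p hp
        rcases (mem_triplesP_append pre z p).mp hp with hp | ⟨q, hq, rfl⟩
        · rw [htr] at hp; exact absurd hp (by simp)
        · rw [h3] at hq; exact absurd hq (by simp)
    | some mpv, some Mpv =>
      match mt with
      | none =>
        show GoodB (pre ++ [z]) (some (min a z), some (max b z),
          some (min mpv (min (a * z) (b * z))), some (max Mpv (max (a * z) (b * z))),
          some (min (mpv * z) (Mpv * z)))
        exact ⟨optMin_sing_append pre z a h1, optMax_sing_append pre z b h2,
          pairs_min_step pre z a b mpv h1 h2 h3, pairs_max_step pre z a b Mpv h1 h2 h4,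
          triples_min_new pre z mpv Mpv h3 h4 h5⟩
      | some mtv =>
        show GoodB (pre ++ [z]) (some (min a z), some (max b z),
          some (min mpv (min (a * z) (b * z))), some (max Mpv (max (a * z) (b * z))),
          some (min mtv (min (mpv * z) (Mpv * z))))
        exact ⟨optMin_sing_append pre z a h1, optMax_sing_append pre z b h2,
          pairs_min_step pre z a b mpv h1 h2 h3, pairs_max_step pre z a b Mpv h1 h2 h4,
          triples_min_step pre z mpv Mpv mtv h3 h4 h5⟩

theorem GoodB_foldl (l : List Int) :
    ∀ (pre : List Int) (st : Option Int × Option Int × Option Int × Option Int × Option Int),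
      GoodB pre st → GoodB (pre ++ l) (l.foldl bStep st) := by
  induction l with
  | nil => intro pre st h; simpa using h
  | cons z l ih =>
    intro pre st h
    have h' := ih (pre ++ [z]) (bStep st z) (GoodB_step pre z st h)
    simpa [List.append_assoc] using h'

theorem B_isMin0 (l : List Int) : IsMin0 (triplesP l) (min_product_alt l) := by
  have hg : GoodB l (l.foldl bStep (none, none, none, none, none)) := by
    simpa using GoodB_foldl l [] (none, none, none, none, none) ⟨rfl, rfl, rfl, rfl, rfl⟩
  have h5 := hg.2.2.2.2
  cases hmt : (l.foldl bStep (none, none, none, none, none)).2.2.2.2 with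
  | none =>
    have hv : min_product_alt l = 0 := by simp [min_product_alt, hmt]
    rw [hv]
    rw [hmt] at h5
    refine ⟨Or.inl rfl, le_refl 0, ?_⟩
    intro p hp; rw [h5] at hp; exact absurd hp (by simp)
  | some v =>
    have hv : min_product_alt l = min 0 v := by simp [min_product_alt, hmt]
    rw [hv]
    rw [hmt] at h5
    obtain ⟨hmem, hle⟩ := h5
    refine ⟨?_, min_le_left _ _, ?_⟩
    · rcases min_choice 0 v with hm | hm <;> rw [hm]
      · exact Or.inl rfl
      · exact Or.inr hmem
    · intro p hp
      exact le_trans (min_le_right _ _) (hle p hp)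

def tripletsA (l : List Int) : List (List Int) :=
  (PySem.List.pyRange 0 ((PySem.List.len l) - 2) 1).foldl (fun acc i =>
    (PySem.List.pyRange (i + 1) ((PySem.List.len l) - 1) 1).foldl (fun acc j =>
      (PySem.List.pyRange (j + 1) (PySem.List.len l) 1).foldl (fun acc k =>
        acc ++ [[PySem.List.pyGetD l i 0, PySem.List.pyGetD l j 0,
                 PySem.List.pyGetD l k 0]]) acc) acc) []

theorem A_pair_fold (ts : List (List Int)) :
    ∀ c : Int, (ts.foldl (fun (st : Int × Int) triplet =>
        let triplet_sum := triplet.prod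
        if st.2 > triplet_sum then (triplet_sum, triplet_sum) else (st.2, st.2)) (c, c))
      = (ts.foldl (fun a t => min a t.prod) c, ts.foldl (fun a t => min a t.prod) c) := by
  induction ts with
  | nil => intro c; rfl
  | cons t ts ih =>
    intro c
    rw [List.foldl_cons, List.foldl_cons]
    have hstep : (let triplet_sum := t.prod
        if ((c, c) : Int × Int).2 > triplet_sum then (triplet_sum, triplet_sum)
        else ((c, c).2, (c, c).2))
        = ((min c t.prod, min c t.prod) : Int × Int) := by
      simp only [gt_iff_lt]
      split_ifs with h
      · simp [min_eq_right (le_of_lt h)]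
      · simp [min_eq_left (le_of_not_gt h)]
    rw [hstep, ih (min c t.prod)]

theorem min_product_eq_fold (l : List Int) :
    min_product l = (tripletsA l).foldl (fun a t => min a t.prod) 0 := by
  show ((tripletsA l).foldl (fun (st : Int × Int) triplet =>
      let triplet_sum := triplet.prod
      if st.2 > triplet_sum then (triplet_sum, triplet_sum) else (st.2, st.2)) (0, 0)).1
    = (tripletsA l).foldl (fun a t => min a t.prod) 0
  rw [A_pair_fold]

theorem tripletsA_eq (l : List Int) :
    tripletsA l = (PySem.List.pyRange 0 ((PySem.List.len l) - 2) 1).flatMap (fun i =>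
      (PySem.List.pyRange (i + 1) ((PySem.List.len l) - 1) 1).flatMap (fun j =>
        (PySem.List.pyRange (j + 1) (PySem.List.len l) 1).map (fun k =>
          [PySem.List.pyGetD l i 0, PySem.List.pyGetD l j 0, PySem.List.pyGetD l k 0]))) := by
  unfold tripletsA
  rw [PySem.List.foldl_congr_mem (g := fun acc i => acc ++
    (PySem.List.pyRange (i + 1) ((PySem.List.len l) - 1) 1).flatMap (fun j =>
      (PySem.List.pyRange (j + 1) (PySem.List.len l) 1).map (fun k =>
        [PySem.List.pyGetD l i 0, PySem.List.pyGetD l j 0, PySem.List.pyGetD l k 0])))]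
  · rw [PySem.List.foldl_append_eq_flatMap]
    simp
  · intro acc i _
    rw [PySem.List.foldl_congr_mem (g := fun acc j => acc ++
      (PySem.List.pyRange (j + 1) (PySem.List.len l) 1).map (fun k =>
        [PySem.List.pyGetD l i 0, PySem.List.pyGetD l j 0, PySem.List.pyGetD l k 0]))]
    · rw [PySem.List.foldl_append_eq_flatMap]
    · intro acc j _
      rw [PySem.List.foldl_append_singleton_eq_map]

theorem pyGetD_toNat (l : List Int) (i : Int) (h0 : 0 ≤ i) (h : i < l.length) :
    PySem.List.pyGetD l i 0 = l.getD i.toNat 0 := by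
  rw [PySem.List.pyGetD_eq_getElem l 0 h0 (by exact_mod_cast h),
    List.getD_eq_getElem l 0 (by omega)]

theorem mem_tripletsA_prod (l : List Int) (p : Int) :
    p ∈ (tripletsA l).map List.prod ↔ p ∈ triplesP l := by
  rw [mem_triplesP, tripletsA_eq]
  simp only [List.mem_map, List.mem_flatMap, PySem.List.mem_pyRange_one, PySem.List.len_eq]
  constructor
  · rintro ⟨t, ⟨i, ⟨hi0, hi⟩, j, ⟨hj1, hj⟩, k, ⟨hk1, hk⟩, rfl⟩, rfl⟩
    refine ⟨i.toNat, j.toNat, k.toNat, by omega, by omega, by omega, ?_⟩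
    rw [pyGetD_toNat l i hi0 (by omega), pyGetD_toNat l j (by omega) (by omega),
      pyGetD_toNat l k (by omega) (by omega)]
    simp [List.prod_cons]
  · rintro ⟨i, j, k, hij, hjk, hk, rfl⟩
    refine ⟨[PySem.List.pyGetD l (i : Int) 0, PySem.List.pyGetD l (j : Int) 0,
      PySem.List.pyGetD l (k : Int) 0], ⟨(i : Int), ⟨by omega, by omega⟩, (j : Int),
      ⟨by omega, by omega⟩, (k : Int), ⟨by omega, by omega⟩, rfl⟩, ?_⟩
    rw [pyGetD_toNat l i (by omega) (by omega), pyGetD_toNat l j (by omega) (by omega),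
      pyGetD_toNat l k (by omega) (by omega)]
    simp [List.prod_cons]

theorem A_isMin0 (l : List Int) : IsMin0 (triplesP l) (min_product l) := by
  rw [min_product_eq_fold]
  obtain ⟨h1, h2, h3⟩ := foldl_min_spec List.prod (tripletsA l) 0
  refine isMin0_congr (fun p => mem_tripletsA_prod l p) ⟨h1, h2, h3⟩

-- ===== VERDICT (by name: the statement is the Claim_ definition above) =====
theorem min_product_spec : Claim_equal_min_product := by
  intro input_list _
  unfold Spec_min_product
  exact isMin0_unique (A_isMin0 input_list) (B_isMin0 input_list)
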